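-- pv_equiv track=rewrite | github.com/Vanovango/Chess_Tasks_Profi | generate_task_and_save.py | check_alternating_colors
-- ===== SOURCE A (Python) =====
-- def check_alternating_colors(cycle, circles, colors):
--     """Verify that circle colors alternate along the cycle path."""
--     circle_positions = [c for c in cycle if c in circles]
--     if not circle_positions:
--         return True
--     for i in range(len(circle_positions) - 1):
--         current = circle_positions[i]
--         next_circle = circle_positions[i + 1]
--         if colors[current] == colors[next_circle]:
--             return False
--     return True
-- ===== SOURCE B (Python) =====
-- def check_alternating_colors(cycle, circles, colors):
--     """Verify that circle colors alternate along the cycle path."""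
--     cols = [colors[c] for c in cycle if c in circles]
--     compressed = []
--     for col in cols:
--         if not compressed or compressed[-1] != col:
--             compressed.append(col)
--     return compressed == cols
-- ===== Notes on version B (the rewrite author's own statement) =====
-- stated objective: alternative
-- what changed: B maps the circle positions to their color sequence, run-length-compresses that sequence (keeping one representative per run of equal colors), and returns whether the compressed copy equals the original, instead of A's index loop over adjacent pairs with early return.
-- outside the precondition, e.g. on check_alternating_colors([5], {5}, {}): A returns True, B raises KeyError; on check_alternating_colors([1, 1, 2], {1, 2}, {1: 'w'}): A returns False, B raises KeyError
import Mathlib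
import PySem

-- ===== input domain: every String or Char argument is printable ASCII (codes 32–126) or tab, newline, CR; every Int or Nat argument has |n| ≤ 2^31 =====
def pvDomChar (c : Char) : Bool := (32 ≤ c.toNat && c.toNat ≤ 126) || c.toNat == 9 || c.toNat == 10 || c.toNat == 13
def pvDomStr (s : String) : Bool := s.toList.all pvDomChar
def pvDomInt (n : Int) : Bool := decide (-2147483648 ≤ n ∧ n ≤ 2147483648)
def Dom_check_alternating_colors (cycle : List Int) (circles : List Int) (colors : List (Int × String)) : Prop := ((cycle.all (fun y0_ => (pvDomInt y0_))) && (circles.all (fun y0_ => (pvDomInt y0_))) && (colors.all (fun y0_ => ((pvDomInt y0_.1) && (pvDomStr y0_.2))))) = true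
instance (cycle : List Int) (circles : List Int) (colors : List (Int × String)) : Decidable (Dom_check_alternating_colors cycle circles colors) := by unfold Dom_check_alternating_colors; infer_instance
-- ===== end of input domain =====

-- B maps circle positions to their color sequence, run-length-compresses it and
-- tests the compression for identity, instead of A's index loop over adjacent
-- pairs (objective: alternative algorithm, same cost).


-- ===== PORT A =====
-- A's index loop 'for i in range(len(cps)-1)' as index recursion; colors[c] is a
-- dict lookup ported as PySem.Dict.get? (none = KeyError, excluded by Pre_).
def aLoop (cps : List Int) (colors : List (Int × String)) (i : Nat) : Bool :=
  if h : i + 1 < cps.length then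
    if PySem.Dict.get? (PySem.Dict.mk colors) cps[i] = PySem.Dict.get? (PySem.Dict.mk colors) cps[i + 1] then false
    else aLoop cps colors (i + 1)
  else true
termination_by cps.length - i

def check_alternating_colors (cycle : List Int) (circles : List Int) (colors : List (Int × String)) : Bool :=
  let circle_positions := cycle.filter (fun c => circles.contains c)
  if circle_positions = [] then true
  else aLoop circle_positions colors 0

-- ===== PORT B =====
-- Source B's lookups colors[c] are Dict.get?; a none is Python's KeyError, excluded by
-- Pre_, so the color sequence is List (Option String). The run-compression loop
-- appends to the back exactly as the Python does (compressed[-1] = acc.getLast?).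
def bStep (acc : List (Option String)) (col : Option String) : List (Option String) :=
  if acc = [] ∨ acc.getLast? ≠ some col then acc ++ [col] else acc

def check_alternating_colors_alt (cycle : List Int) (circles : List Int) (colors : List (Int × String)) : Bool :=
  let cols := (cycle.filter (fun c => circles.contains c)).map
    (fun c => PySem.Dict.get? (PySem.Dict.mk colors) c)
  let compressed := cols.foldl bStep []
  compressed == cols

-- ===== PRECONDITION & SPEC =====
-- Pre_ excludes inputs where some cycle element lying in circles has no entry in
-- colors: there B raises KeyError while A either raises KeyError too or returns a
-- value (True with a single such position, False after an early equal pair)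
-- without ever performing the failing lookup — an artefact of its early exit.
def Pre_check_alternating_colors (cycle : List Int) (circles : List Int) (colors : List (Int × String)) : Prop :=
  ∀ c ∈ cycle, circles.contains c → (PySem.Dict.get? (PySem.Dict.mk colors) c).isSome

instance (cycle : List Int) (circles : List Int) (colors : List (Int × String)) : Decidable (Pre_check_alternating_colors cycle circles colors) := by unfold Pre_check_alternating_colors; infer_instance

def pvWitness_check_alternating_colors : List Int × List Int × (List (Int × String)) :=
  ([1, 2, 3, 2], [1, 2], [(1, "white"), (2, "black"), (3, "white")])

def Spec_check_alternating_colors (cycle : List Int) (circles : List Int) (colors : List (Int × String)) (out : Bool) : Prop := out = check_alternating_colors_alt cycle circles colors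
instance (cycle : List Int) (circles : List Int) (colors : List (Int × String)) (out : Bool) : Decidable (Spec_check_alternating_colors cycle circles colors out) := by unfold Spec_check_alternating_colors; infer_instance

-- ===== CLAIM (what is proved, stated in full; the proofs are below) =====
def Claim_equal_check_alternating_colors : Prop := ∀ (cycle : List Int) (circles : List Int) (colors : List (Int × String)), Dom_check_alternating_colors cycle circles colors → Pre_check_alternating_colors cycle circles colors → Spec_check_alternating_colors cycle circles colors (check_alternating_colors cycle circles colors)

-- ===== LEMMAS AND PROOFS =====

-- adjacent-distinct check on an arbitrary list; both ports reduce to it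
def pairCheckCols : List (Option String) → Bool
  | [] => true
  | [_] => true
  | a :: b :: r => if a = b then false else pairCheckCols (b :: r)

-- A's pairwise check expressed on the position list
def pairCheck (colors : List (Int × String)) : List Int → Bool
  | [] => true
  | [_] => true
  | a :: b :: r =>
    if PySem.Dict.get? (PySem.Dict.mk colors) a = PySem.Dict.get? (PySem.Dict.mk colors) b then false
    else pairCheck colors (b :: r)

theorem aLoop_eq_pairCheck (colors : List (Int × String)) :
    ∀ (l : List Int) (i : Nat), aLoop l colors i = pairCheck colors (l.drop i) := by
  intro l i
  induction hn : l.length - i using Nat.strong_induction_on generalizing i with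
  | _ n ih =>
    rw [aLoop]
    split
    · rename_i h
      have hdrop : l.drop i = l[i] :: l.drop (i + 1) := by
        rw [List.getElem_cons_drop]
      have hdrop2 : l.drop (i + 1) = l[i + 1] :: l.drop (i + 2) := by
        rw [List.getElem_cons_drop]
      rw [hdrop, hdrop2, pairCheck]
      split
      · rfl
      · rw [← hdrop2, ih (l.length - (i + 1)) (by omega) (i + 1) rfl]
    · rename_i h
      have : l.drop i = [] ∨ ∃ a, l.drop i = [a] := by
        have hl : (l.drop i).length = l.length - i := List.length_drop ..
        match hd : l.drop i with
        | [] => exact Or.inl rfl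
        | [a] => exact Or.inr ⟨a, rfl⟩
        | a :: b :: r => rw [hd] at hl; simp at hl; omega
      rcases this with h0 | ⟨a, h1⟩
      · rw [h0]; rfl
      · rw [h1]; rfl

theorem pairCheck_map (colors : List (Int × String)) :
    ∀ l : List Int,
      pairCheck colors l = pairCheckCols (l.map (fun c => PySem.Dict.get? (PySem.Dict.mk colors) c)) := by
  intro l
  match l with
  | [] => rfl
  | [_] => rfl
  | a :: b :: r =>
    rw [pairCheck]
    simp only [List.map_cons, pairCheckCols]
    split
    · rfl
    · exact pairCheck_map colors (b :: r)

-- recursive characterization of the run compression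
def crec (p : Option String) : List (Option String) → List (Option String)
  | [] => []
  | b :: r => if b = p then crec p r else b :: crec b r

theorem crec_length_le (p : Option String) : ∀ l, (crec p l).length ≤ l.length := by
  intro l
  induction l generalizing p with
  | nil => simp [crec]
  | cons b r ih =>
    rw [crec]
    split
    · exact le_trans (ih p) (by simp)
    · simpa using ih b

theorem foldl_bStep (l : List (Option String)) :
    ∀ (acc : List (Option String)) (p : Option String), acc.getLast? = some p →
      l.foldl bStep acc = acc ++ crec p l := by
  induction l with
  | nil => intro acc p _; simp [crec]
  | cons b r ih =>
    intro acc p hp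
    have hne : acc ≠ [] := by intro h; rw [h] at hp; simp at hp
    rw [List.foldl_cons, crec]
    by_cases hbp : b = p
    · have : bStep acc b = acc := by
        unfold bStep
        rw [if_neg]
        simp [hne, hp, hbp]
      rw [this, if_pos hbp, ih acc p hp]
    · have : bStep acc b = acc ++ [b] := by
        unfold bStep
        rw [if_pos]
        right
        rw [hp]
        simp
        exact fun h => hbp h.symm
      rw [this, if_neg hbp, ih (acc ++ [b]) b (by simp)]
      simp

theorem crec_eq_iff (r : List (Option String)) :
    ∀ p, crec p r = r ↔ pairCheckCols (p :: r) = true := by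
  induction r with
  | nil => intro p; simp [crec, pairCheckCols]
  | cons b r ih =>
    intro p
    rw [crec]
    by_cases hbp : b = p
    · rw [if_pos hbp]
      constructor
      · intro h
        have := crec_length_le p r
        rw [h] at this
        simp at this
      · intro h
        rw [show pairCheckCols (p :: b :: r) = false by rw [pairCheckCols, if_pos hbp.symm]] at h
        simp at h
    · rw [if_neg hbp, show pairCheckCols (p :: b :: r) = pairCheckCols (b :: r) by
        rw [pairCheckCols, if_neg (fun h => hbp h.symm)]]
      constructor
      · intro h
        exact (ih b).mp (by injection h)
      · intro h
        rw [(ih b).mpr h]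

theorem compress_eq_iff (l : List (Option String)) :
    l.foldl bStep [] = l ↔ pairCheckCols l = true := by
  match l with
  | [] => simp [pairCheckCols]
  | b :: r =>
    have h1 : bStep [] b = [b] := by unfold bStep; simp
    rw [List.foldl_cons, h1, foldl_bStep r [b] b (by simp)]
    simp only [List.singleton_append, List.cons.injEq, true_and]
    exact crec_eq_iff r b

-- ===== VERDICT (by name: the statement is the Claim_ definition above) =====
theorem check_alternating_colors_spec : Claim_equal_check_alternating_colors := by
  intro cycle circles colors _ _
  unfold Spec_check_alternating_colors check_alternating_colors check_alternating_colors_alt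
  set cps := cycle.filter (fun c => circles.contains c) with hcps
  set cols := cps.map (fun c => PySem.Dict.get? (PySem.Dict.mk colors) c) with hcols
  have hB : (cols.foldl bStep [] == cols) = pairCheckCols cols := by
    by_cases h : List.foldl bStep [] cols = cols
    · rw [(compress_eq_iff cols).mp h]
      simp [h]
    · have h2 : pairCheckCols cols ≠ true := fun hc => h ((compress_eq_iff cols).mpr hc)
      rw [Bool.eq_false_iff.mpr h2]
      simpa using h
  show (if cps = [] then true else aLoop cps colors 0) = (cols.foldl bStep [] == cols)
  rw [hB]
  split
  · rename_i h
    rw [hcols, h]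
    rfl
  · rw [aLoop_eq_pairCheck colors cps 0, List.drop_zero, pairCheck_map]
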